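-- pv_equiv track=rewrite | github.com/Abhay-Kanwasi/Learning-Python | String/dsa.py | equal_point_in_brackets_approach2
-- ===== SOURCE A (Python) =====
-- def equal_point_in_brackets_approach2(string):
--     open_count = 0
--     close_count = 0
--
--     # count total closing brackets
--     for ch in string:
--         if ch == ')':
--             close_count += 1
--
--     # traverse string
--     for index, ch in enumerate(string):
--         if open_count == close_count:
--             return index
--
--         if ch == '(':
--             open_count += 1
--         else:
--             close_count -= 1
--
--     return -1
-- ===== SOURCE B (Python) =====
-- def equal_point_in_brackets_approach2(string):
--     close = string.count(')')
--     return close if close < len(string) else -1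
-- ===== Notes on version B (the rewrite author's own statement) =====
-- stated objective: simpler
-- what changed: Replaced the count-pass plus index-scan loop with a closed form: the scan returns the first index equal to the total closing-bracket count, so B just returns that count when it is a valid index, else -1.
import Mathlib
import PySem

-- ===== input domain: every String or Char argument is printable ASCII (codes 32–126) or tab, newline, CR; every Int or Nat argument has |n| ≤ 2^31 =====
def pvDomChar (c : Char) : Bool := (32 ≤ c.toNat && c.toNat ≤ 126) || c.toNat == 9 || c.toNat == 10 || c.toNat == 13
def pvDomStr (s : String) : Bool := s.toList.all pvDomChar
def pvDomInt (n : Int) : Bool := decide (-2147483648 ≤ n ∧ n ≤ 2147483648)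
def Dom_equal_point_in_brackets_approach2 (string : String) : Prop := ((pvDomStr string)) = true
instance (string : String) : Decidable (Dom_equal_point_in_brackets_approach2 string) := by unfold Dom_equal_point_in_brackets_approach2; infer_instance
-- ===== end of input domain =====

-- B replaces the count-then-scan loop with the closed form it computes (the closing-bracket count when it is a valid index, else -1): simpler, no scan loop.

-- ===== PORT A =====
-- the second loop of A: at each index, return it if open_count == close_count, else update and continue
def pvLoopA : List Char → Int → Int → Int → Int
  | [], _, _, _ => -1
  | ch :: rest, idx, opens, closes =>
    if opens == closes then idx
    else if ch == '(' then pvLoopA rest (idx + 1) (opens + 1) closes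
    else pvLoopA rest (idx + 1) opens (closes - 1)

def equal_point_in_brackets_approach2 (string : String) : Int :=
  let close_count : Int := string.toList.foldl (fun c ch => if ch == ')' then c + 1 else c) 0
  pvLoopA string.toList 0 0 close_count

-- ===== PORT B =====
def equal_point_in_brackets_approach2_alt (string : String) : Int :=
  let close : Int := (PySem.Str.count string ")" : Int)
  if close < PySem.Str.len string then close else -1

-- ===== PRECONDITION & SPEC =====
def Spec_equal_point_in_brackets_approach2 (string : String) (out : Int) : Prop := out = equal_point_in_brackets_approach2_alt string
instance (string : String) (out : Int) : Decidable (Spec_equal_point_in_brackets_approach2 string out) := by unfold Spec_equal_point_in_brackets_approach2; infer_instance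

-- ===== CLAIM (what is proved, stated in full; the proofs are below) =====
def Claim_equal_equal_point_in_brackets_approach2 : Prop := ∀ (string : String), Dom_equal_point_in_brackets_approach2 string → Spec_equal_point_in_brackets_approach2 string (equal_point_in_brackets_approach2 string)

-- ===== LEMMAS AND PROOFS =====

-- Python str.count with a single-character needle is the element count
theorem chars_count_go_singleton (c : Char) (fuel : Nat) :
    ∀ (l : List Char) (acc : Nat), l.length ≤ fuel →
      PySem.Chars.count.go [c] fuel l acc = acc + l.count c := by
  induction fuel with
  | zero =>
    intro l acc h
    cases l with
    | nil => simp [PySem.Chars.count.go]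
    | cons x t => simp at h
  | succ n ih =>
    intro l acc h
    cases l with
    | nil => simp [PySem.Chars.count.go]
    | cons x t =>
      simp only [PySem.Chars.count.go]
      by_cases hx : x = c
      · subst hx
        simp only [List.isPrefixOf, beq_self_eq_true, Bool.and_true, if_true,
          List.length_cons, List.length_nil, List.drop_succ_cons, List.drop_zero, List.count_cons]
        rw [ih t (acc + 1) (by simpa using h)]
        simp [Nat.add_comm, Nat.add_left_comm]
      · have hpre : ([c].isPrefixOf (x :: t)) = false := by
          simp only [List.isPrefixOf, Bool.and_true,
            beq_eq_false_iff_ne, ne_eq]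
          exact fun hh => hx hh.symm
        rw [hpre]
        simp only [Bool.false_eq_true, if_false]
        rw [ih t acc (by simpa using h)]
        have hcc : List.count c (x :: t) = List.count c t := by
          simp [List.count_cons]
          exact hx
        rw [hcc]

theorem chars_count_singleton (l : List Char) (c : Char) :
    PySem.Chars.count l [c] = l.count c := by
  simp only [PySem.Chars.count, List.isEmpty_cons, Bool.false_eq_true, if_false]
  simpa using chars_count_go_singleton c l.length l 0 le_rfl

-- A's scan returns the first index where opens = closes; the difference closes - opens
-- drops by exactly one per step, giving this closed form.
theorem pvLoopA_closed (l : List Char) :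
    ∀ (idx opens closes : Int),
      pvLoopA l idx opens closes =
        if 0 ≤ closes - opens ∧ closes - opens < (l.length : Int)
        then idx + (closes - opens) else -1 := by
  induction l with
  | nil =>
    intro idx opens closes
    simp only [pvLoopA, List.length_nil, Int.natCast_zero]
    split_ifs with h
    · omega
    · rfl
  | cons ch rest ih =>
    intro idx opens closes
    simp only [pvLoopA]
    by_cases he : opens = closes
    · subst he
      simp only [beq_self_eq_true, if_true, List.length_cons]
      split_ifs with h
      · omega
      · exfalso; push Not at h; omega
    · have hbe : (opens == closes) = false := by simpa using he
      rw [hbe]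
      simp only [Bool.false_eq_true, if_false]
      by_cases hc : ch = '('
      · simp only [hc, beq_self_eq_true, if_true, ih]
        simp only [List.length_cons]
        split_ifs with h1 h2 h2 <;> push_cast at * <;> omega
      · have : (ch == '(') = false := by simpa using hc
        rw [this]
        simp only [Bool.false_eq_true, if_false, ih, List.length_cons]
        split_ifs with h1 h2 h2 <;> push_cast at * <;> omega

-- ===== VERDICT (by name: the statement is the Claim_ definition above) =====
theorem equal_point_in_brackets_approach2_spec : Claim_equal_equal_point_in_brackets_approach2 := by
  intro s _
  unfold Spec_equal_point_in_brackets_approach2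
  unfold equal_point_in_brackets_approach2 equal_point_in_brackets_approach2_alt
  have hcnt : s.toList.foldl (fun c ch => if ch == ')' then c + 1 else c) (0 : Int)
      = (s.toList.count ')' : Int) := by
    rw [PySem.List.foldl_beq_add_one]
    simp
  have hc : (PySem.Str.count s ")" : Int) = (s.toList.count ')' : Int) := by
    rw [PySem.Str.count_eq]
    have h1 : (")" : String).toList = [')'] := rfl
    rw [h1, chars_count_singleton]
  have hlen : PySem.Str.len s = (s.toList.length : Int) := by
    rw [PySem.Str.len_eq]
  simp only [hcnt, pvLoopA_closed, hc, hlen]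
  have hcount_le : s.toList.count ')' ≤ s.toList.length := List.count_le_length
  split_ifs with h1 h2 h2 <;> push_cast at * <;> omega
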